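-- pv_equiv track=rewrite | github.com/Chrizdgs/PyMiniSide-Projects | Codedex March Daily challenge/Daylight_Savings.py | sleep_debt
-- ===== SOURCE A (Python) =====
-- def sleep_debt(planned, actual):
--     debts = [max(0, p - a) for p, a in zip(planned, actual)]
--     total = sum(debts) + 1  # Daylight Savings hour
--
--     longest = curr = 0
--     for d in debts:
--         curr = curr + 1 if d > 0 else 0
--         longest = max(longest, curr)
--
--     return total, longest
-- ===== SOURCE B (Python) =====
-- from itertools import groupby
--
-- def sleep_debt(planned, actual):
--     debts = [max(0, p - a) for p, a in zip(planned, actual)]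
--     total = sum(debts) + 1  # Daylight Savings hour
--     longest = max((sum(1 for _ in g) for k, g in groupby(debts, key=lambda x: x > 0) if k),
--                   default=0)
--     return total, longest
-- ===== Notes on version B (the rewrite author's own statement) =====
-- stated objective: idiomatic
-- what changed: The running curr/longest counter loop is replaced by itertools.groupby over debts keyed on positivity: the longest deficit streak is the maximum length of the positive groups (default 0).
import Mathlib
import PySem

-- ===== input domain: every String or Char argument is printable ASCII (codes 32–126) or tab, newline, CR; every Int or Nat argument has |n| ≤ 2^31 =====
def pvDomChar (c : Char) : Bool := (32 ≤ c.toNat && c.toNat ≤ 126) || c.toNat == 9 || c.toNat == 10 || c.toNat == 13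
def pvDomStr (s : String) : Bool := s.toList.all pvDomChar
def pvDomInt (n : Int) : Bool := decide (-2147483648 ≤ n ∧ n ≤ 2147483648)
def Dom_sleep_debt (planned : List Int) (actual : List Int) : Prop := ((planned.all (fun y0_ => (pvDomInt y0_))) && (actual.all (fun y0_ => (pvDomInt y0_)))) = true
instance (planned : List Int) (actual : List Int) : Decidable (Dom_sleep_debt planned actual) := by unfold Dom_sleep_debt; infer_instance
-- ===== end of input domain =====

-- B replaces A's running curr/longest counter loop by grouping consecutive debts by
-- positivity (itertools.groupby) and taking the maximum length of the positive groups (idiomatic).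


-- ===== PORT A =====
def sleep_debt (planned : List Int) (actual : List Int) : Int × Int :=
  let debts := (List.zip planned actual).map (fun pa => max 0 (pa.1 - pa.2))
  let total := debts.foldl (· + ·) 0 + 1
  let lc := debts.foldl (fun (s : Int × Int) d =>
      let curr := if d > 0 then s.2 + 1 else 0
      (max s.1 curr, curr)) (0, 0)
  (total, lc.1)

-- ===== PORT B =====
-- port of itertools.groupby specialised to key (x > 0): list of (key, group length)
def groupLens : List Int → List (Bool × Int)
  | [] => []
  | d :: t =>
    let k := decide (d > 0)
    let run := t.takeWhile (fun x => decide (x > 0) == k)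
    let rest := t.dropWhile (fun x => decide (x > 0) == k)
    (k, 1 + (run.length : Int)) :: groupLens rest
termination_by l => l.length
decreasing_by
  have := List.length_dropWhile_le (fun x => decide (x > 0) == decide (d > 0)) t
  simp only [List.length_cons]
  omega

def sleep_debt_alt (planned : List Int) (actual : List Int) : Int × Int :=
  let debts := (List.zip planned actual).map (fun pa => max 0 (pa.1 - pa.2))
  let total := debts.foldl (· + ·) 0 + 1
  let longest := ((groupLens debts).filter (fun g => g.1)).foldl (fun m g => max m g.2) 0
  (total, longest)

-- ===== PRECONDITION & SPEC =====
def Spec_sleep_debt (planned : List Int) (actual : List Int) (out : Int × Int) : Prop := out = sleep_debt_alt planned actual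
instance (planned : List Int) (actual : List Int) (out : Int × Int) : Decidable (Spec_sleep_debt planned actual out) := by unfold Spec_sleep_debt; infer_instance

-- ===== CLAIM (what is proved, stated in full; the proofs are below) =====
def Claim_equal_sleep_debt : Prop := ∀ (planned : List Int) (actual : List Int), Dom_sleep_debt planned actual → Spec_sleep_debt planned actual (sleep_debt planned actual)

-- ===== LEMMAS AND PROOFS =====

/-- The maximum streak value reached by A's loop, starting with current streak `c`. -/
def runMax : Int → List Int → Int
  | _, [] => 0
  | c, d :: t => if d > 0 then max (c + 1) (runMax (c + 1) t) else runMax 0 t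

theorem foldA (l : List Int) (L c : Int) (hL : 0 ≤ L) :
    (l.foldl (fun (s : Int × Int) d =>
      let curr := if d > 0 then s.2 + 1 else 0
      (max s.1 curr, curr)) (L, c)).1 = max L (runMax c l) := by
  induction l generalizing L c with
  | nil => simp [runMax]; omega
  | cons d t ih =>
    simp only [List.foldl_cons, runMax]
    by_cases hd : d > 0
    · simp only [hd, if_pos]
      rw [ih _ _ (by omega)]
      omega
    · simp only [hd, if_neg, not_false_iff]
      rw [ih _ _ (by omega)]
      omega

theorem nonposApp (u v : List Int) (hu : ∀ x ∈ u, ¬ x > 0) :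
    runMax 0 (u ++ v) = runMax 0 v := by
  induction u with
  | nil => rfl
  | cons x u' ih =>
    have hx := hu x (by simp)
    simp only [List.cons_append, runMax, if_neg hx]
    exact ih (fun y hy => hu y (by simp [hy]))

theorem posApp (u : List Int) (v : List Int) (c : Int) (hu : ∀ x ∈ u, x > 0) :
    max (c + 1) (runMax (c + 1) (u ++ v)) =
    max (c + 1 + u.length) (runMax (c + 1 + u.length) v) := by
  induction u generalizing c with
  | nil => simp
  | cons x u' ih =>
    have hx := hu x (by simp)
    simp only [List.cons_append, runMax, if_pos hx, List.length_cons]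
    push_cast
    have h := ih (c + 1) (fun y hy => hu y (by simp [hy]))
    have e1 : runMax (c + 1 + 1 + (u'.length : Int)) v = runMax (c + 1 + ((u'.length : Int) + 1)) v := by
      congr 1; ring
    rw [h, e1]
    omega

theorem dropHead (p : Int → Bool) (l : List Int) (x : Int) (xs : List Int)
    (h : l.dropWhile p = x :: xs) : p x = false := by
  induction l with
  | nil => simp [List.dropWhile] at h
  | cons y ys ih =>
    by_cases hy : p y
    · exact ih (by simpa [List.dropWhile, hy] using h)
    · simp [List.dropWhile, hy] at h
      rw [h.1] at hy
      simpa using hy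

theorem restIndep (p : Int → Bool) (l : List Int) (hp : ∀ x, p x = decide (x > 0)) (c : Int) :
    runMax c (l.dropWhile p) = runMax 0 (l.dropWhile p) := by
  cases h : l.dropWhile p with
  | nil => rfl
  | cons x xs =>
    have hx : ¬ x > 0 := by
      have := dropHead p l x xs h
      rw [hp x] at this
      simpa using this
    simp [runMax, hx]

theorem gmax_init (gs : List (Bool × Int)) (a b : Int) :
    gs.foldl (fun m g => max m g.2) (max a b) = max a (gs.foldl (fun m g => max m g.2) b) := by
  induction gs generalizing b with
  | nil => rfl
  | cons g gs' ih =>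
    simp only [List.foldl_cons]
    rw [show max (max a b) g.2 = max a (max b g.2) by omega, ih]

theorem main_aux : ∀ n (l : List Int), l.length ≤ n →
    runMax 0 l = ((groupLens l).filter (fun g => g.1)).foldl (fun m g => max m g.2) 0 := by
  intro n
  induction n with
  | zero =>
    intro l hl
    have : l = [] := List.eq_nil_of_length_eq_zero (by omega)
    subst this
    simp [runMax, groupLens]
  | succ n ih =>
    intro l hl
    cases l with
    | nil => simp [runMax, groupLens]
    | cons d t =>
      rw [show groupLens (d :: t) = (decide (d > 0), 1 + (((t.takeWhile (fun x => decide (x > 0) == decide (d > 0))).length : Int))) :: groupLens (t.dropWhile (fun x => decide (x > 0) == decide (d > 0))) from by rw [groupLens]]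
      have hsplit := List.takeWhile_append_dropWhile (p := fun x => decide (x > 0) == decide (d > 0)) (l := t)
      have hrest : (t.dropWhile (fun x => decide (x > 0) == decide (d > 0))).length ≤ n := by
        have := List.length_dropWhile_le (fun x => decide (x > 0) == decide (d > 0)) t
        simp only [List.length_cons] at hl
        omega
      by_cases hd : d > 0
      · have hk : decide (d > 0) = true := by simpa using hd
        rw [hk] at hsplit hrest ⊢
        have hposrun : ∀ x ∈ t.takeWhile (fun x => decide (x > 0) == true), x > 0 := by
          intro x hx
          have := List.mem_takeWhile_imp hx
          simpa using this
        rw [List.filter_cons_of_pos (by simp), List.foldl_cons]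
        rw [show (max 0 (1 + ((t.takeWhile (fun x => decide (x > 0) == true)).length : Int))) = max (1 + ((t.takeWhile (fun x => decide (x > 0) == true)).length : Int)) 0 by omega]
        rw [gmax_init, ← ih _ hrest]
        have hstep : runMax 0 (d :: t) = max (0 + 1) (runMax (0 + 1) (t.takeWhile (fun x => decide (x > 0) == true) ++ t.dropWhile (fun x => decide (x > 0) == true))) := by
          conv_lhs => rw [show d :: t = d :: (t.takeWhile (fun x => decide (x > 0) == true) ++ t.dropWhile (fun x => decide (x > 0) == true)) by rw [hsplit]]
          simp [runMax, hd]
        rw [hstep, posApp _ _ _ hposrun,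
            restIndep (fun x => decide (x > 0) == true) t (fun x => by simp)]
        omega
      · have hk : decide (d > 0) = false := by simpa using hd
        rw [hk] at hsplit hrest ⊢
        have hnonpos : ∀ x ∈ t.takeWhile (fun x => decide (x > 0) == false), ¬ x > 0 := by
          intro x hx
          have := List.mem_takeWhile_imp hx
          simpa using this
        rw [List.filter_cons_of_neg (by simp), ← ih _ hrest]
        have hstep : runMax 0 (d :: t) = runMax 0 t := by simp [runMax, hd]
        rw [hstep]
        conv_lhs => rw [← hsplit]
        exact nonposApp _ _ hnonpos

-- ===== VERDICT (by name: the statement is the Claim_ definition above) =====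
theorem sleep_debt_spec : Claim_equal_sleep_debt := by
  intro planned actual _
  unfold Spec_sleep_debt sleep_debt sleep_debt_alt
  simp only
  congr 1
  rw [foldA _ _ _ (by omega)]
  rw [main_aux ((List.zip planned actual).map (fun pa => max 0 (pa.1 - pa.2))).length _ le_rfl]
  have h0 := gmax_init ((groupLens ((List.zip planned actual).map (fun pa => max 0 (pa.1 - pa.2)))).filter (fun g => g.1)) 0 0
  simp only [max_self] at h0
  omega
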